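-- pv_equiv track=rewrite | github.com/Sakurina0420/ycmd | ycmd/completers/cpp/flags.py | _RemoveXclangFlags
-- ===== SOURCE A (Python) =====
-- def _RemoveXclangFlags( flags ):
--   """Drops -Xclang flags.  These are typically used to pass in options to
--   clang cc1 which are not used in the front-end, so they are not needed for
--   code completion."""
--
--   sanitized_flags = []
--   saw_xclang = False
--   for i, flag in enumerate( flags ):
--     if flag == '-Xclang':
--       saw_xclang = True
--       continue
--     elif saw_xclang:
--       saw_xclang = False
--       continue
--
--     sanitized_flags.append( flag )
--
--   return sanitized_flags
-- ===== SOURCE B (Python) =====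
-- def _RemoveXclangFlags( flags ):
--   """Drops -Xclang flags.  These are typically used to pass in options to
--   clang cc1 which are not used in the front-end, so they are not needed for
--   code completion."""
--
--   # Split the list on '-Xclang' markers into segments; every segment after
--   # the first begins with the flag that was the marker's argument, so drop
--   # each later segment's head and glue the segments back together.
--   segments = []
--   current = []
--   for flag in flags:
--     if flag == '-Xclang':
--       segments.append( current )
--       current = []
--     else:
--       current.append( flag )
--   segments.append( current )
--   return segments[ 0 ] + [ flag for segment in segments[ 1 : ]
--                            for flag in segment[ 1 : ] ]
-- ===== Notes on version B (the rewrite author's own statement) =====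
-- stated objective: alternative
-- what changed: Replaces the per-element saw_xclang state machine with a split-then-trim pipeline: split the list into segments at each '-Xclang' marker, then keep the first segment whole and drop the head (the marker's argument) of every later segment before concatenating.
import Mathlib
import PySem

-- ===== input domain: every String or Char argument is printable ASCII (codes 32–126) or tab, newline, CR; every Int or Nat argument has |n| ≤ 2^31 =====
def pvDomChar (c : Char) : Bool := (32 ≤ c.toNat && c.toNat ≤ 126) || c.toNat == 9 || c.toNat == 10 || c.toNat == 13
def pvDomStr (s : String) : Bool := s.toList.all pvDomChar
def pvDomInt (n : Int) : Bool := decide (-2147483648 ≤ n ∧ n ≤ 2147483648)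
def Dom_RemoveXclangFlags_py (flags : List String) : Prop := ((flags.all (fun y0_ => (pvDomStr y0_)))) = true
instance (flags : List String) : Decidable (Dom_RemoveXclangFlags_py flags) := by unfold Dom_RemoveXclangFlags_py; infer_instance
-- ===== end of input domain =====

-- B replaces A's saw_xclang state machine by a split-on-marker / drop-segment-heads / concatenate pipeline (objective: alternative).


-- ===== PORT A =====
-- the loop body of A: state = (sanitized_flags, saw_xclang)
def pvStepA (st : List String × Bool) (flag : String) : List String × Bool :=
  if flag = "-Xclang" then (st.1, true)
  else if st.2 then (st.1, false)
  else (st.1 ++ [flag], st.2)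

def RemoveXclangFlags_py (flags : List String) : List String :=
  (flags.foldl pvStepA ([], false)).1

-- ===== PORT B =====
-- the loop body of B's splitting pass: state = (segments, current)
def pvStepB (st : List (List String) × List String) (flag : String) : List (List String) × List String :=
  if flag = "-Xclang" then (st.1 ++ [st.2], [])
  else (st.1, st.2 ++ [flag])

def RemoveXclangFlags_py_alt (flags : List String) : List String :=
  let st := flags.foldl pvStepB ([], [])
  let segments := st.1 ++ [st.2]
  -- segments[0]: segments is never empty (the final append); headD is exact here
  segments.headD [] ++ ((segments.drop 1).map (fun segment => segment.drop 1)).flatten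

-- ===== PRECONDITION & SPEC =====
def Spec_RemoveXclangFlags_py (flags : List String) (out : List String) : Prop := out = RemoveXclangFlags_py_alt flags
instance (flags : List String) (out : List String) : Decidable (Spec_RemoveXclangFlags_py flags out) := by unfold Spec_RemoveXclangFlags_py; infer_instance

-- ===== CLAIM (what is proved, stated in full; the proofs are below) =====
def Claim_equal_RemoveXclangFlags_py : Prop := ∀ (flags : List String), Dom_RemoveXclangFlags_py flags → Spec_RemoveXclangFlags_py flags (RemoveXclangFlags_py flags)

-- ===== LEMMAS AND PROOFS =====

-- common reference function: process the list knowing whether the previous flag was '-Xclang'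
def pvGo : Bool → List String → List String
  | _, [] => []
  | saw, f :: r =>
    if f = "-Xclang" then pvGo true r
    else if saw then pvGo false r
    else f :: pvGo saw r

-- reference splitting: the segments produced from pending segment `cur` by the rest `l`
def pvSegs : List String → List String → List (List String)
  | cur, [] => [cur]
  | cur, f :: r => if f = "-Xclang" then cur :: pvSegs [] r else pvSegs (cur ++ [f]) r

theorem foldA_eq (l : List String) : ∀ (acc : List String) (saw : Bool),
    (l.foldl pvStepA (acc, saw)).1 = acc ++ pvGo saw l := by
  induction l with
  | nil => intro acc saw; simp [pvGo]
  | cons f r ih =>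
    intro acc saw
    by_cases hf : f = "-Xclang"
    · simp [pvStepA, hf, pvGo, ih]
    · cases saw with
      | true => simp [pvStepA, hf, pvGo, ih]
      | false => simp [pvStepA, hf, pvGo, ih]

theorem foldB_eq (l : List String) : ∀ (segs : List (List String)) (cur : List String),
    (l.foldl pvStepB (segs, cur)).1 ++ [(l.foldl pvStepB (segs, cur)).2]
      = segs ++ pvSegs cur l := by
  induction l with
  | nil => intro segs cur; simp [pvSegs]
  | cons f r ih =>
    intro segs cur
    by_cases hf : f = "-Xclang"
    · simp [pvStepB, hf, pvSegs, ih]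
    · simp [pvStepB, hf, pvSegs, ih]

-- dropping each segment's head and flattening equals A's skip-mode processing
theorem segs_tail_eq (r : List String) : ∀ (cur : List String),
    ((pvSegs cur r).map (fun segment => segment.drop 1)).flatten
      = cur.drop 1 ++ pvGo cur.isEmpty r := by
  induction r with
  | nil => intro cur; cases cur <;> simp [pvSegs, pvGo]
  | cons f r' ih =>
    intro cur
    by_cases hf : f = "-Xclang"
    · cases cur <;> simp [pvSegs, pvGo, hf] <;> simpa using ih []
    · cases cur with
      | nil => simpa [pvSegs, pvGo, hf] using ih [f]
      | cons c cs =>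
        simp only [pvSegs, pvGo, hf]
        simpa using ih (c :: (cs ++ [f]))

-- the head segment stays whole: B's trim of pvSegs equals cur ++ A's normal-mode processing
theorem segs_trim_eq (l : List String) : ∀ (cur : List String),
    (pvSegs cur l).headD [] ++ (((pvSegs cur l).drop 1).map (fun segment => segment.drop 1)).flatten
      = cur ++ pvGo false l := by
  induction l with
  | nil => intro cur; simp [pvSegs, pvGo]
  | cons f r ih =>
    intro cur
    by_cases hf : f = "-Xclang"
    · simp only [pvSegs, pvGo, hf]
      simpa using segs_tail_eq r []
    · simp only [pvSegs, pvGo, if_neg hf]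
      simpa using ih (cur ++ [f])

-- ===== VERDICT (by name: the statement is the Claim_ definition above) =====
theorem RemoveXclangFlags_py_spec : Claim_equal_RemoveXclangFlags_py := by
  intro flags _
  show RemoveXclangFlags_py flags = RemoveXclangFlags_py_alt flags
  have hB := foldB_eq flags [] []
  simp only [List.nil_append] at hB
  rw [RemoveXclangFlags_py, RemoveXclangFlags_py_alt, foldA_eq]
  simp only [List.nil_append]
  rw [hB, segs_trim_eq]
  simp
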